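-- pv_equiv track=rewrite | github.com/T-rav/hyrda | tasks/jobs/website_scrape.py | _filter_urls
-- ===== SOURCE A (Python) =====
-- def _filter_urls(
--     urls: list[str], include_patterns: list[str], exclude_patterns: list[str]
-- ) -> list[str]:
--     filtered = urls
--
--     # Apply include patterns
--     if include_patterns:
--         filtered = [
--             url
--             for url in filtered
--             if any(pattern in url for pattern in include_patterns)
--         ]
--
--     # Apply exclude patterns
--     if exclude_patterns:
--         filtered = [
--             url
--             for url in filtered
--             if not any(pattern in url for pattern in exclude_patterns)
--         ]
--
--     return filtered
-- ===== SOURCE B (Python) =====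
-- def _filter_urls(
--     urls: list[str], include_patterns: list[str], exclude_patterns: list[str]
-- ) -> list[str]:
--     # Pattern-outer mask algorithm: fold each pattern over a boolean keep-mask,
--     # then materialize the surviving urls in one final pass.
--     if include_patterns:
--         kept = [False] * len(urls)
--         for pattern in include_patterns:
--             kept = [k or (pattern in url) for k, url in zip(kept, urls)]
--     else:
--         kept = [True] * len(urls)
--     for pattern in exclude_patterns:
--         kept = [k and (pattern not in url) for k, url in zip(kept, urls)]
--     return [url for url, k in zip(urls, kept) if k]
-- ===== Notes on version B (the rewrite author's own statement) =====
-- stated objective: alternative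
-- what changed: Replaces A's url-outer staged filters with a pattern-outer algorithm: it folds each include/exclude pattern over a boolean keep-mask (one mask update per pattern) and materializes the surviving urls in a single final pass.
import Mathlib
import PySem

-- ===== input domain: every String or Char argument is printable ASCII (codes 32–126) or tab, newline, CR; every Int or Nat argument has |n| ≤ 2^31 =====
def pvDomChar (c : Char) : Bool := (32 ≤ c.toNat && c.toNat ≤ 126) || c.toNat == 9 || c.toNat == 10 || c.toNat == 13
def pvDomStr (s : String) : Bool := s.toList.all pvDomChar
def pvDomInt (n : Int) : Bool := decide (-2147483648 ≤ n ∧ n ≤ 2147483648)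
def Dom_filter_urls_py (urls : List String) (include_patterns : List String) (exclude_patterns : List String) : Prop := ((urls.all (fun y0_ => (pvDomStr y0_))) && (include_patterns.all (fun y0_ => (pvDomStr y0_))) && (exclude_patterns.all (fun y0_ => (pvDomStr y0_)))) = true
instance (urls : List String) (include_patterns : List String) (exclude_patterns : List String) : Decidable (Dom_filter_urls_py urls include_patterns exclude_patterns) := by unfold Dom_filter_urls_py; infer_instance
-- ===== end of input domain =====

-- B replaces A's url-outer staged filters with a pattern-outer boolean keep-mask fold (alternative decomposition, same cost).

-- ===== PORT A =====
-- Port of A: start from urls, apply the include-filter pass if include_patterns is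
-- nonempty, then the exclude-filter pass if exclude_patterns is nonempty.
def filter_urls_py (urls : List String) (include_patterns : List String) (exclude_patterns : List String) : List String :=
  let filtered := urls
  let filtered :=
    if include_patterns.isEmpty then filtered
    else filtered.filter (fun url => include_patterns.any (fun pattern => PySem.Str.isIn pattern url))
  let filtered :=
    if exclude_patterns.isEmpty then filtered
    else filtered.filter (fun url => !(exclude_patterns.any (fun pattern => PySem.Str.isIn pattern url)))
  filtered

-- ===== PORT B =====
-- Port of B: pattern-outer mask algorithm — fold each pattern over a boolean
-- keep-mask (zip with urls), then emit the urls whose mask entry is true.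
def filter_urls_py_alt (urls : List String) (include_patterns : List String) (exclude_patterns : List String) : List String :=
  let kept :=
    if include_patterns.isEmpty then
      List.replicate urls.length true
    else
      include_patterns.foldl
        (fun kept pattern => (kept.zip urls).map (fun ku => ku.1 || PySem.Str.isIn pattern ku.2))
        (List.replicate urls.length false)
  let kept :=
    exclude_patterns.foldl
      (fun kept pattern => (kept.zip urls).map (fun ku => ku.1 && !(PySem.Str.isIn pattern ku.2)))
      kept
  (urls.zip kept).filterMap (fun uk => if uk.2 then some uk.1 else none)

-- ===== PRECONDITION & SPEC =====
def Spec_filter_urls_py (urls : List String) (include_patterns : List String) (exclude_patterns : List String) (out : List String) : Prop := out = filter_urls_py_alt urls include_patterns exclude_patterns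
instance (urls : List String) (include_patterns : List String) (exclude_patterns : List String) (out : List String) : Decidable (Spec_filter_urls_py urls include_patterns exclude_patterns out) := by unfold Spec_filter_urls_py; infer_instance

-- ===== CLAIM (what is proved, stated in full; the proofs are below) =====
def Claim_equal_filter_urls_py : Prop := ∀ (urls : List String) (include_patterns : List String) (exclude_patterns : List String), Dom_filter_urls_py urls include_patterns exclude_patterns → Spec_filter_urls_py urls include_patterns exclude_patterns (filter_urls_py urls include_patterns exclude_patterns)

-- ===== LEMMAS AND PROOFS =====

-- (urls.map f).zip urls pairs each url's mask value with the url
theorem zip_map_self {α β : Type} (urls : List α) (f : α → β) :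
    (urls.map f).zip urls = urls.map (fun u => (f u, u)) := by
  induction urls with
  | nil => rfl
  | cons u us ih => simp only [List.map_cons, List.zip_cons_cons, ih]

-- a replicate mask is the map of the constant function
theorem replicate_eq_map {α : Type} (urls : List α) (b : Bool) :
    List.replicate urls.length b = urls.map (fun _ => b) := by
  induction urls with
  | nil => rfl
  | cons u us ih => simp only [List.length_cons, List.replicate_succ, List.map_cons, ih]

-- one mask-update step on a mask of shape urls.map f is a map over urls
theorem step_map {α : Type} (urls : List α) (f : α → Bool) (g : Bool → α → Bool) :
    ((urls.map f).zip urls).map (fun ku => g ku.1 ku.2) = urls.map (fun u => g (f u) u) := by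
  rw [zip_map_self]; simp

-- folding the OR-updates of all include patterns over a mask urls.map f
theorem fold_or (ps : List String) :
    ∀ (urls : List String) (f : String → Bool),
      ps.foldl (fun kept p => (kept.zip urls).map (fun ku => ku.1 || PySem.Str.isIn p ku.2)) (urls.map f)
        = urls.map (fun u => f u || ps.any (fun p => PySem.Str.isIn p u)) := by
  induction ps with
  | nil => intro urls f; simp
  | cons p ps ih =>
    intro urls f
    simp only [List.foldl_cons]
    rw [step_map urls f (fun k u => k || PySem.Str.isIn p u), ih]
    simp [Bool.or_assoc]

-- folding the AND-updates of all exclude patterns over a mask urls.map f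
theorem fold_and (ps : List String) :
    ∀ (urls : List String) (f : String → Bool),
      ps.foldl (fun kept p => (kept.zip urls).map (fun ku => ku.1 && !(PySem.Str.isIn p ku.2))) (urls.map f)
        = urls.map (fun u => f u && !(ps.any (fun p => PySem.Str.isIn p u))) := by
  induction ps with
  | nil => intro urls f; simp
  | cons p ps ih =>
    intro urls f
    simp only [List.foldl_cons]
    rw [step_map urls f (fun k u => k && !(PySem.Str.isIn p u)), ih]
    simp [Bool.and_assoc]

-- materializing a mask of shape urls.map k is filtering by k
theorem zip_filterMap (urls : List String) (k : String → Bool) :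
    (urls.zip (urls.map k)).filterMap (fun uk => if uk.2 then some uk.1 else none)
      = urls.filter k := by
  induction urls with
  | nil => rfl
  | cons u us ih =>
    by_cases h : k u <;> simp [h, ih]

-- B computes a single filter by the combined predicate
theorem alt_eq_filter (urls inc exc : List String) :
    filter_urls_py_alt urls inc exc
      = urls.filter (fun u =>
          (inc.isEmpty || inc.any (fun p => PySem.Str.isIn p u)) &&
          !(exc.any (fun p => PySem.Str.isIn p u))) := by
  unfold filter_urls_py_alt
  cases hI : inc.isEmpty
  · simp only [Bool.false_eq_true, if_false]
    rw [replicate_eq_map urls false, fold_or, fold_and, zip_filterMap]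
  · simp only [if_true]
    rw [replicate_eq_map urls true, fold_and, zip_filterMap]
    simp only [Bool.true_or, Bool.true_and]

-- ===== VERDICT (by name: the statement is the Claim_ definition above) =====
theorem filter_urls_py_spec : Claim_equal_filter_urls_py := by
  intro urls inc exc _
  unfold Spec_filter_urls_py
  rw [alt_eq_filter]
  unfold filter_urls_py
  cases hI : inc.isEmpty <;> cases hE : exc.isEmpty
  · -- both nonempty: fused filters
    simp only [Bool.false_eq_true, if_false, List.filter_filter]
    exact (List.filter_congr fun a _ => by simp [Bool.and_comm]).symm
  · -- exc empty
    rcases List.isEmpty_iff.mp hE with rfl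
    simp
  · -- inc empty
    rcases List.isEmpty_iff.mp hI with rfl
    simp
  · rcases List.isEmpty_iff.mp hI with rfl
    rcases List.isEmpty_iff.mp hE with rfl
    simp
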